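-- pv_equiv track=rewrite | github.com/Mc4minta/Slot-machine-python-project | Slotmachine python project (first python project)/slotMachine.py | check_winning
-- ===== SOURCE A (Python) =====
-- def check_winning(columns,lines,bet,values):
--     winnings = 0
--     #check if the first symbols on that columns in 'lines' rows is the same or not
--     lines_won = []
--     for line in range(lines):
--         symbol = columns[0][line]
--         for column in columns:
--             symbol_to_check = column[line]
--             if symbol != symbol_to_check:
--                 break
--         else:
--             lines_won.append(line + 1)
--             winnings += values[symbol] * bet
--     return winnings, lines_won
-- ===== SOURCE B (Python) =====
-- def check_winning(columns, lines, bet, values):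
--     # Column-major pass: maintain a per-row "still all equal" flag array while
--     # scanning each reel once, then collect the surviving rows in staged passes.
--     winning = [True] * max(lines, 0)
--     for column in columns:
--         for line in range(lines):
--             if column[line] != columns[0][line]:
--                 winning[line] = False
--     lines_won = [line + 1 for line in range(lines) if winning[line]]
--     winnings = sum(values[columns[0][line]] * bet for line in range(lines) if winning[line])
--     return winnings, lines_won
-- ===== Notes on version B (the rewrite author's own statement) =====
-- stated objective: alternative
-- what changed: B swaps the loop nesting: instead of A's row-major scan with an early-break inner loop over columns, B makes one column-major pass maintaining a per-row boolean flag array, then derives the won lines and the winnings in staged passes over those flags.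
-- outside the precondition, e.g. on check_winning([['a', 'x'], ['b', 'y'], ['c']], 2, 1, {}): A returns (0, []), B raises IndexError
import Mathlib
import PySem

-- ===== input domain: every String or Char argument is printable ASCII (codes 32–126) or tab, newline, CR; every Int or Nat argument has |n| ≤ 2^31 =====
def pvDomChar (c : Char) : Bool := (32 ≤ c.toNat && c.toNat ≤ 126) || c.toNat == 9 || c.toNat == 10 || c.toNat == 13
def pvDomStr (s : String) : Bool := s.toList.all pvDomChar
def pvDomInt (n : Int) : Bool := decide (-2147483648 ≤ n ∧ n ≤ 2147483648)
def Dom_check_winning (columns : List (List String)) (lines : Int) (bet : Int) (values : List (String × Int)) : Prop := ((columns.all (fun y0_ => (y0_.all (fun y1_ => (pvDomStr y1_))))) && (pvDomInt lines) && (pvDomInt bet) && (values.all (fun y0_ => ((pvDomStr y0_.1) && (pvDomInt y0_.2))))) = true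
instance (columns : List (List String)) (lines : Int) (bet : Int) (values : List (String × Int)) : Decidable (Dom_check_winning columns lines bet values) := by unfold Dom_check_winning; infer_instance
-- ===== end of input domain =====

-- B swaps the loop nesting: one column-major pass maintaining a per-row boolean flag
-- array instead of A's row-major early-break scan, then staged passes over the flags.

-- ===== PORT A =====
-- inner 'for column in columns: … break / else' loop; none = IndexError
def pvInnerA (line : Int) (symbol : String) : List (List String) → Option Bool
  | [] => some true
  | col :: rest =>
    match PySem.List.pyGet? col line with
    | none => none
    | some symbol_to_check =>
      if symbol ≠ symbol_to_check then some false
      else pvInnerA line symbol rest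

def pvStepA (columns : List (List String)) (bet : Int) (values : List (String × Int))
    (acc : Option (Int × List Int)) (line : Int) : Option (Int × List Int) :=
  acc.bind fun wl =>
    (PySem.List.pyGet? columns 0).bind fun col0 =>
      (PySem.List.pyGet? col0 line).bind fun symbol =>
        (pvInnerA line symbol columns).bind fun allEq =>
          if allEq then
            (PySem.Dict.get? (PySem.Dict.mk values) symbol).map fun v =>
              (wl.1 + v * bet, wl.2 ++ [line + 1])
          else some wl

def check_winning (columns : List (List String)) (lines : Int) (bet : Int) (values : List (String × Int)) : Int × List Int :=
  ((PySem.List.pyRange 0 lines 1).foldl (pvStepA columns bet values) (some (0, []))).getD (0, [])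

-- ===== PORT B =====
-- the inner 'for line in range(lines)' loop over one column, updating the flag array;
-- columns[0][line] / column[line] are in range on every admitted input (Pre_), so
-- pyGetD with a dummy default is exact there; flag indexing flags[line] is List.set.
def pvInnerB (columns : List (List String)) (lines : Int) (fl : List Bool) (column : List String) : List Bool :=
  (PySem.List.pyRange 0 lines 1).foldl (fun fl line =>
    if PySem.List.pyGetD column line "" ≠ PySem.List.pyGetD (columns.headD []) line ""
    then fl.set line.toNat false else fl) fl

def check_winning_alt (columns : List (List String)) (lines : Int) (bet : Int) (values : List (String × Int)) : Int × List Int :=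
  let winning := columns.foldl (pvInnerB columns lines) (List.replicate (max lines 0).toNat true)
  let won := (PySem.List.pyRange 0 lines 1).filter (fun line => winning.getD line.toNat false)
  (won.foldl (fun s line =>
      s + (PySem.Dict.getD (PySem.Dict.mk values) (PySem.List.pyGetD (columns.headD []) line "") 0) * bet) 0,
   won.map (fun line => line + 1))

-- ===== PRECONDITION & SPEC =====
-- Pre_ excludes the inputs where A raises (empty columns, a column shorter than `lines`
-- reached before a mismatch, a winning symbol missing from `values`), and with them all
-- ragged-column inputs: whether A survives a short column depends only on the accidental
-- position of its early break, and B's column-major pass raises IndexError there.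
def Pre_check_winning (columns : List (List String)) (lines : Int) (bet : Int) (values : List (String × Int)) : Prop :=
  lines ≤ 0 ∨
  (columns ≠ [] ∧ (∀ col ∈ columns, lines ≤ (col.length : Int)) ∧
    ∀ i ∈ PySem.List.pyRange 0 lines 1,
      (columns.all (fun col => PySem.List.pyGetD col i "" == PySem.List.pyGetD (columns.headD []) i "")) = true →
      (PySem.Dict.contains (PySem.Dict.mk values) (PySem.List.pyGetD (columns.headD []) i "")) = true)

instance (columns : List (List String)) (lines : Int) (bet : Int) (values : List (String × Int)) : Decidable (Pre_check_winning columns lines bet values) := by unfold Pre_check_winning; infer_instance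

def pvWitness_check_winning : List (List String) × Int × Int × (List (String × Int)) :=
  ([["a", "b"], ["a", "c"]], 2, 3, [("a", 5)])

def Spec_check_winning (columns : List (List String)) (lines : Int) (bet : Int) (values : List (String × Int)) (out : Int × List Int) : Prop := out = check_winning_alt columns lines bet values
instance (columns : List (List String)) (lines : Int) (bet : Int) (values : List (String × Int)) (out : Int × List Int) : Decidable (Spec_check_winning columns lines bet values out) := by unfold Spec_check_winning; infer_instance

-- ===== CLAIM (what is proved, stated in full; the proofs are below) =====
def Claim_equal_check_winning : Prop := ∀ (columns : List (List String)) (lines : Int) (bet : Int) (values : List (String × Int)), Dom_check_winning columns lines bet values → Pre_check_winning columns lines bet values → Spec_check_winning columns lines bet values (check_winning columns lines bet values)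

-- ===== LEMMAS AND PROOFS =====

-- the row-win test both sides compute
def pvWinP (columns : List (List String)) (line : Int) : Bool :=
  columns.all (fun col => PySem.List.pyGetD col line "" == PySem.List.pyGetD (columns.headD []) line "")

def pvValD (columns : List (List String)) (values : List (String × Int)) (line : Int) : Int :=
  PySem.Dict.getD (PySem.Dict.mk values) (PySem.List.pyGetD (columns.headD []) line "") 0

-- A's step with the option plumbing stripped (valid inside Pre_)
def pvPlainA (columns : List (List String)) (bet : Int) (values : List (String × Int))
    (wl : Int × List Int) (line : Int) : Int × List Int :=
  if pvWinP columns line then (wl.1 + pvValD columns values line * bet, wl.2 ++ [line + 1]) else wl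

-- in-range pyGet? returns the pyGetD value
lemma pvGet?_eq (xs : List String) (i : Int) (h0 : 0 ≤ i) (h1 : i < (xs.length : Int)) :
    PySem.List.pyGet? xs i = some (PySem.List.pyGetD xs i "") := by
  have hn : i.toNat < xs.length := by omega
  simp only [PySem.List.pyGet?, PySem.List.pyIdx?, PySem.List.pyGetD]
  split
  all_goals simp_all

-- A's inner loop, when every index is in range, computes the all-equal test
lemma pvInnerA_eq (line : Int) (symbol : String) (cols : List (List String))
    (h0 : 0 ≤ line) (hlen : ∀ col ∈ cols, line < (col.length : Int)) :
    pvInnerA line symbol cols = some (cols.all (fun col => PySem.List.pyGetD col line "" == symbol)) := by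
  induction cols with
  | nil => simp [pvInnerA]
  | cons col rest ih =>
    have hc : line < (col.length : Int) := hlen col (by simp)
    rw [pvInnerA, pvGet?_eq col line h0 hc]
    by_cases h : symbol = PySem.List.pyGetD col line ""
    · simp [← h, ih (fun c hc' => hlen c (by simp [hc']))]
    · simp [h, Ne.symm h]

-- one A iteration: option step = plain step (inside Pre_)
lemma pvStepA_eq_plain (columns : List (List String)) (bet : Int) (values : List (String × Int))
    (line : Int) (wl : Int × List Int)
    (hne : columns ≠ []) (h0 : 0 ≤ line)
    (hlen : ∀ col ∈ columns, line < (col.length : Int))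
    (hkey : pvWinP columns line = true →
      (PySem.Dict.contains (PySem.Dict.mk values) (PySem.List.pyGetD (columns.headD []) line "")) = true) :
    pvStepA columns bet values (some wl) line = some (pvPlainA columns bet values wl line) := by
  obtain ⟨c0, cs, rfl⟩ := List.exists_cons_of_ne_nil hne
  have hget0 : PySem.List.pyGet? (c0 :: cs) (0 : Int) = some c0 := by
    have h00 : (0 : ℕ) < (c0 :: cs).length := by simp
    simpa using PySem.List.pyGet?_natCast (xs := c0 :: cs) h00
  set symbol := PySem.List.pyGetD c0 line "" with hsym
  have hgets : PySem.List.pyGet? c0 line = some symbol :=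
    pvGet?_eq c0 line h0 (hlen c0 (by simp))
  have hinner := pvInnerA_eq line symbol (c0 :: cs) h0 hlen
  have hwin : pvWinP (c0 :: cs) line
      = ((c0 :: cs).all (fun col => PySem.List.pyGetD col line "" == symbol)) := by
    simp [pvWinP, hsym]
  rw [pvStepA, Option.bind_some, hget0, Option.bind_some, hgets, Option.bind_some, hinner,
    Option.bind_some]
  by_cases hall : ((c0 :: cs).all (fun col => PySem.List.pyGetD col line "" == symbol)) = true
  · have hcont := hkey (by rw [hwin]; exact hall)
    have hsome : (PySem.Dict.get? (PySem.Dict.mk values) symbol).isSome := by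
      rw [PySem.Dict.contains_eq_isSome_get?] at hcont
      simpa [hsym] using hcont
    obtain ⟨v, hv⟩ := Option.isSome_iff_exists.mp hsome
    rw [hall, if_pos rfl, hv]
    rw [pvPlainA, if_pos (by rw [hwin]; exact hall)]
    simp [pvValD, PySem.Dict.getD_eq_get?_getD, ← hsym, hv]
  · rw [eq_false_of_ne_true hall, if_neg (by simp)]
    simp [pvPlainA, hwin, hall]

-- A's option fold over in-range indices is the plain fold
lemma pvFoldA_eq_plain (columns : List (List String)) (bet : Int) (values : List (String × Int))
    (lines : Int)
    (hne : columns ≠ [])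
    (hlen : ∀ col ∈ columns, lines ≤ (col.length : Int))
    (hkey : ∀ i ∈ PySem.List.pyRange 0 lines 1, pvWinP columns i = true →
      (PySem.Dict.contains (PySem.Dict.mk values) (PySem.List.pyGetD (columns.headD []) i "")) = true)
    (l : List Int) (hl : ∀ i ∈ l, i ∈ PySem.List.pyRange 0 lines 1) :
    ∀ wl : Int × List Int,
      l.foldl (pvStepA columns bet values) (some wl)
        = some (l.foldl (pvPlainA columns bet values) wl) := by
  induction l with
  | nil => intro wl; simp
  | cons i rest ih =>
    intro wl
    have hi := hl i (by simp)
    have hrange := (PySem.List.mem_pyRange_one).mp hi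
    rw [List.foldl_cons, List.foldl_cons,
      pvStepA_eq_plain columns bet values i wl hne hrange.1
        (fun col hc => lt_of_lt_of_le hrange.2 (hlen col hc))
        (hkey i hi)]
    exact ih (fun j hj => hl j (by simp [hj])) _

-- the plain A fold equals B's staged (sum, map) form
lemma pvPlain_fold (columns : List (List String)) (bet : Int) (values : List (String × Int)) :
    ∀ (l : List Int) (w0 : Int) (l0 : List Int),
      l.foldl (pvPlainA columns bet values) (w0, l0)
        = (w0 + (l.filter (pvWinP columns)).foldl
              (fun s line => s + pvValD columns values line * bet) 0,
           l0 ++ (l.filter (pvWinP columns)).map (fun line => line + 1)) := by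
  intro l
  induction l with
  | nil => intro w0 l0; simp
  | cons i rest ih =>
    intro w0 l0
    by_cases hw : pvWinP columns i = true
    · rw [List.foldl_cons, pvPlainA, if_pos hw, ih, List.filter_cons_of_pos hw,
        List.foldl_cons,
        PySem.List.foldl_add (g := fun line => pvValD columns values line * bet),
        PySem.List.foldl_add (g := fun line => pvValD columns values line * bet)]
      simp only [Prod.mk.injEq]
      exact ⟨by ring, by simp⟩
    · rw [List.foldl_cons, List.filter_cons_of_neg (by simp [hw]),
        pvPlainA, if_neg (by simp [hw]), ih]

-- setting index k to false, read through getD _ false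
lemma pvGetD_set_false (fl : List Bool) (k j : ℕ) :
    (fl.set k false).getD j false = if j = k then false else fl.getD j false := by
  by_cases h : j = k
  · subst h
    by_cases hk : j < fl.length
    · simp [List.getD, List.getElem?_set_self hk]
    · have h1 : (fl.set j false)[j]? = none :=
        List.getElem?_eq_none (by simpa using Nat.le_of_not_lt hk)
      simp [List.getD, h1]
  · simp [List.getD, List.getElem?_set_ne (fun hkj => h hkj.symm), h]

-- B's inner flag loop, read pointwise
lemma pvInnerB_getD (columns : List (List String)) (column : List String)
    (L : List Int) (hL : ∀ i ∈ L, 0 ≤ i) (fl : List Bool) (j : ℕ) :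
    (L.foldl (fun fl line =>
        if PySem.List.pyGetD column line "" ≠ PySem.List.pyGetD (columns.headD []) line ""
        then fl.set line.toNat false else fl) fl).getD j false
      = (fl.getD j false &&
          (!(decide ((j : Int) ∈ L)) ||
            (PySem.List.pyGetD column (j : Int) "" == PySem.List.pyGetD (columns.headD []) (j : Int) ""))) := by
  induction L generalizing fl with
  | nil => simp
  | cons i rest ih =>
    have hi : 0 ≤ i := hL i (by simp)
    rw [List.foldl_cons, ih (fun x hx => hL x (by simp [hx]))]
    by_cases hm : PySem.List.pyGetD column i "" ≠ PySem.List.pyGetD (columns.headD []) i ""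
    · rw [if_pos hm, pvGetD_set_false]
      by_cases hj : j = i.toNat
      · have hji : (j : Int) = i := by omega
        have hbeq : (PySem.List.pyGetD column (j : Int) "" == PySem.List.pyGetD (columns.headD []) (j : Int) "") = false := by
          rw [hji]; simpa using hm
        have hmem : decide ((j : Int) ∈ i :: rest) = true := by
          rw [hji]; simp
        rw [if_pos hj, hbeq, hmem]
        simp
      · have hji : (j : Int) ≠ i := by omega
        have hmem : decide ((j : Int) ∈ i :: rest) = decide ((j : Int) ∈ rest) := by
          simp [hji]
        rw [if_neg hj, hmem]
    · rw [if_neg hm, not_ne_iff] at *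
      by_cases hji : (j : Int) = i
      · have hbeq : (PySem.List.pyGetD column (j : Int) "" == PySem.List.pyGetD (columns.headD []) (j : Int) "") = true := by
          rw [hji]; simpa using hm
        rw [hbeq]
        simp
      · have hmem : decide ((j : Int) ∈ i :: rest) = decide ((j : Int) ∈ rest) := by
          simp [hji]
        rw [hmem]

-- the whole flag array, read pointwise: flag j = all columns agree at row j
lemma pvFlags_getD (columns cs : List (List String)) (lines : Int) (fl : List Bool) (j : ℕ)
    (hj : (j : Int) ∈ PySem.List.pyRange 0 lines 1) :
    (cs.foldl (pvInnerB columns lines) fl).getD j false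
      = (fl.getD j false &&
          cs.all (fun col => PySem.List.pyGetD col (j : Int) "" == PySem.List.pyGetD (columns.headD []) (j : Int) "")) := by
  induction cs generalizing fl with
  | nil => simp
  | cons c rest ih =>
    rw [List.foldl_cons, ih, List.all_cons]
    unfold pvInnerB
    rw [pvInnerB_getD columns c _ (fun i hi => ((PySem.List.mem_pyRange_one).mp hi).1) fl j,
      decide_eq_true hj]
    simp [Bool.and_assoc]

-- check_winning_alt with its lets expanded (definitional)
lemma pvAlt_eq (columns : List (List String)) (lines : Int) (bet : Int) (values : List (String × Int)) :
    check_winning_alt columns lines bet values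
      = (((PySem.List.pyRange 0 lines 1).filter (fun line =>
            (columns.foldl (pvInnerB columns lines) (List.replicate (max lines 0).toNat true)).getD line.toNat false)).foldl
            (fun s line =>
              s + (PySem.Dict.getD (PySem.Dict.mk values) (PySem.List.pyGetD (columns.headD []) line "") 0) * bet) 0,
         ((PySem.List.pyRange 0 lines 1).filter (fun line =>
            (columns.foldl (pvInnerB columns lines) (List.replicate (max lines 0).toNat true)).getD line.toNat false)).map
            (fun line => line + 1)) := rfl

-- ===== VERDICT (by name: the statement is the Claim_ definition above) =====
theorem check_winning_spec : Claim_equal_check_winning := by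
  intro columns lines bet values _hdom hpre
  unfold Spec_check_winning check_winning
  rw [pvAlt_eq]
  rcases hpre with hneg | ⟨hne, hlen, hkey⟩
  · rw [PySem.List.pyRange_one_eq_nil (by omega)]
    simp
  · rw [pvFoldA_eq_plain columns bet values lines hne hlen
      (fun i hi => hkey i hi) _ (fun i hi => hi) (0, [])]
    rw [Option.getD_some, pvPlain_fold]
    have hfilter : (PySem.List.pyRange 0 lines 1).filter
        (fun line => ((columns.foldl (pvInnerB columns lines)
            (List.replicate (max lines 0).toNat true)).getD line.toNat false))
        = (PySem.List.pyRange 0 lines 1).filter (pvWinP columns) := by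
      apply List.filter_congr
      intro i hi
      have hr := (PySem.List.mem_pyRange_one).mp hi
      have hcast : ((i.toNat : ℕ) : Int) = i := by omega
      have hjmem : ((i.toNat : ℕ) : Int) ∈ PySem.List.pyRange 0 lines 1 := by rw [hcast]; exact hi
      rw [pvFlags_getD columns columns lines _ i.toNat hjmem]
      have hrep : (List.replicate (max lines 0).toNat true).getD i.toNat false = true := by
        have hlt : i.toNat < (max lines 0).toNat := by omega
        simp [List.getD, hlt]
      rw [hrep, hcast]
      simp [pvWinP]
    rw [hfilter]
    simp [pvValD]
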